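-- pv_equiv track=rewrite | github.com/pavlik-y/Scratch | PythonText/render.py | cropToWindow
-- ===== SOURCE A (Python) =====
-- def cropToWindow(tokens, offset_y, offset_x, height, width):
--   y = 0
--   x = 0
--   for (t, v, c) in tokens:
--     if v == "\n":
--       if offset_y <= y < offset_y + height:
--         yield (t, v, c)
--       y+= 1
--       x = 0
--       continue
--     if y < offset_y:
--       continue
--     if offset_y + height <= y:
--       break
--     # y within bounds
--     if x + len(v) <= offset_x or x >= offset_x + width:
--       x += len(v)
--       continue
--     # at least part of the token is visible
--     if x < offset_x:
--       v = v[offset_x - x:]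
--       x = offset_x
--     if x + len(v) > offset_x + width:
--       yield (t, v[:offset_x + width - x], c)
--     else:
--       yield (t, v, c)
--     x += len(v)
-- ===== SOURCE B (Python) =====
-- def _splitLines(tokens):
--   # yield (line_tokens, newline_token_or_None) per line, lazily
--   line = []
--   for tok in tokens:
--     if tok[1] == "\n":
--       yield line, tok
--       line = []
--     else:
--       line.append(tok)
--   if line:
--     yield line, None
--
-- def _cropLine(line, offset_x, width):
--   x = 0
--   for (t, v, c) in line:
--     if x + len(v) > offset_x and x < offset_x + width:
--       vis = v[max(0, offset_x - x):]        # part right of the left edge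
--       rem = offset_x + width - max(x, offset_x)  # window columns remaining
--       yield (t, vis[:rem], c)
--     x += len(v)
--
-- def cropToWindow(tokens, offset_y, offset_x, height, width):
--   for y, (line, nl) in enumerate(_splitLines(tokens)):
--     if offset_y + height <= y:
--       break
--     if y < offset_y:
--       continue
--     yield from _cropLine(line, offset_x, width)
--     if nl is not None:
--       yield nl
-- ===== Notes on version B (the rewrite author's own statement) =====
-- stated objective: alternative
-- what changed: B splits the token stream into lines first (skipping/stopping by line index) and crops each line with a uniform intersection formula (one left-trim slice plus one remaining-width truncation per visible token), instead of A's single interleaved scan that conditionally re-slices the token and mutates x to the window edge.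
import Mathlib
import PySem

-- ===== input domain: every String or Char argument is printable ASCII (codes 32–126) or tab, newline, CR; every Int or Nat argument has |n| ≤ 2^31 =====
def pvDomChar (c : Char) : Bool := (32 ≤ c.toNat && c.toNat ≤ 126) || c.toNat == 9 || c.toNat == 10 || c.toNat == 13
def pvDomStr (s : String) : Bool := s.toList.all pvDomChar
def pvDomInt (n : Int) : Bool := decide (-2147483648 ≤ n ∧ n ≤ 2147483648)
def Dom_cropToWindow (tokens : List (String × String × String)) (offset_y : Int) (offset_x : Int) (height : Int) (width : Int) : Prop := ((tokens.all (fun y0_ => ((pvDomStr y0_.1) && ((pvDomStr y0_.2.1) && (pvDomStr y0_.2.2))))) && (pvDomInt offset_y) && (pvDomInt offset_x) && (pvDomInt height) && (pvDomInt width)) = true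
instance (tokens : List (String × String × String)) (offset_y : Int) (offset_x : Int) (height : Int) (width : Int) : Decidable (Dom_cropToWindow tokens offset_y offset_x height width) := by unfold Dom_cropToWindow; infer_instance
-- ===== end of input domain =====

-- ===== PORT A =====
-- B re-implements the crop by splitting the stream into lines and cropping each line with a
-- uniform two-slice formula (objective: alternative decomposition; same return value for every input).
def cropToWindowGo (offset_y offset_x height width : Int) (y x : Int) :
    List (String × String × String) → List (String × String × String)
  | [] => []
  | (t, v, c) :: rest =>
    if v = "\n" then
      (if offset_y ≤ y ∧ y < offset_y + height then [(t, v, c)] else []) ++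
        cropToWindowGo offset_y offset_x height width (y + 1) 0 rest
    else if y < offset_y then
      cropToWindowGo offset_y offset_x height width y x rest
    else if offset_y + height ≤ y then
      []
    else if x + PySem.Str.len v ≤ offset_x ∨ offset_x + width ≤ x then
      cropToWindowGo offset_y offset_x height width y (x + PySem.Str.len v) rest
    else
      let v1 := if x < offset_x then PySem.Str.slice v (some (offset_x - x)) none else v
      let x1 := if x < offset_x then offset_x else x
      if offset_x + width < x1 + PySem.Str.len v1 then
        (t, PySem.Str.slice v1 none (some (offset_x + width - x1)), c) ::
          cropToWindowGo offset_y offset_x height width y (x1 + PySem.Str.len v1) rest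
      else
        (t, v1, c) :: cropToWindowGo offset_y offset_x height width y (x1 + PySem.Str.len v1) rest

def cropToWindow (tokens : List (String × String × String)) (offset_y : Int) (offset_x : Int) (height : Int) (width : Int) : List (String × String × String) :=
  cropToWindowGo offset_y offset_x height width 0 0 tokens

-- ===== PORT B =====
-- Source B _splitLines: split the token stream into (line tokens, terminating newline token?) pairs
-- (the growing line is kept reversed so that Source B's O(1) list.append stays O(1) here)
def pvSplitLinesGo (line : List (String × String × String)) :
    List (String × String × String) → List (List (String × String × String) × Option (String × String × String))
  | [] => if line = [] then [] else [(line.reverse, none)]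
  | tok :: rest =>
    if tok.2.1 = "\n" then (line.reverse, some tok) :: pvSplitLinesGo [] rest
    else pvSplitLinesGo (tok :: line) rest

-- Source B _cropLine: walk one line accumulating x, emit the horizontally visible part of each token
def pvCropLineGo (offset_x width x : Int) :
    List (String × String × String) → List (String × String × String)
  | [] => []
  | (t, v, c) :: rest =>
    (if offset_x < x + PySem.Str.len v ∧ x < offset_x + width then
       [(t, PySem.Str.slice (PySem.Str.slice v (some (max 0 (offset_x - x))) none) none
              (some (offset_x + width - max x offset_x)), c)]
     else []) ++ pvCropLineGo offset_x width (x + PySem.Str.len v) rest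

-- Source B main loop: enumerate the lines, break below the window, skip above it
def pvMainGo (offset_y offset_x height width : Int) (y : Int) :
    List (List (String × String × String) × Option (String × String × String)) → List (String × String × String)
  | [] => []
  | (line, nl) :: rest =>
    if offset_y + height ≤ y then []
    else if y < offset_y then pvMainGo offset_y offset_x height width (y + 1) rest
    else
      pvCropLineGo offset_x width 0 line ++
        (match nl with | some tk => [tk] | none => []) ++
        pvMainGo offset_y offset_x height width (y + 1) rest

def cropToWindow_alt (tokens : List (String × String × String)) (offset_y : Int) (offset_x : Int) (height : Int) (width : Int) : List (String × String × String) :=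
  pvMainGo offset_y offset_x height width 0 (pvSplitLinesGo [] tokens)

-- ===== PRECONDITION & SPEC =====
def Spec_cropToWindow (tokens : List (String × String × String)) (offset_y : Int) (offset_x : Int) (height : Int) (width : Int) (out : List (String × String × String)) : Prop := out = cropToWindow_alt tokens offset_y offset_x height width
instance (tokens : List (String × String × String)) (offset_y : Int) (offset_x : Int) (height : Int) (width : Int) (out : List (String × String × String)) : Decidable (Spec_cropToWindow tokens offset_y offset_x height width out) := by unfold Spec_cropToWindow; infer_instance

-- ===== CLAIM (what is proved, stated in full; the proofs are below) =====
def Claim_equal_cropToWindow : Prop := ∀ (tokens : List (String × String × String)) (offset_y : Int) (offset_x : Int) (height : Int) (width : Int), Dom_cropToWindow tokens offset_y offset_x height width → Spec_cropToWindow tokens offset_y offset_x height width (cropToWindow tokens offset_y offset_x height width)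

-- ===== LEMMAS AND PROOFS =====

-- step equations of the four loops, stated once so the proofs can rewrite with them explicitly
theorem cropToWindowGo_nil (oy ox h w y x : Int) : cropToWindowGo oy ox h w y x [] = [] := rfl

theorem cropToWindowGo_cons (oy ox h w y x : Int) (t v c : String)
    (rest : List (String × String × String)) :
    cropToWindowGo oy ox h w y x ((t, v, c) :: rest) =
      if v = "\n" then
        (if oy ≤ y ∧ y < oy + h then [(t, v, c)] else []) ++
          cropToWindowGo oy ox h w (y + 1) 0 rest
      else if y < oy then
        cropToWindowGo oy ox h w y x rest
      else if oy + h ≤ y then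
        []
      else if x + PySem.Str.len v ≤ ox ∨ ox + w ≤ x then
        cropToWindowGo oy ox h w y (x + PySem.Str.len v) rest
      else if ox + w < (if x < ox then ox else x) +
          PySem.Str.len (if x < ox then PySem.Str.slice v (some (ox - x)) none else v) then
        (t, PySem.Str.slice (if x < ox then PySem.Str.slice v (some (ox - x)) none else v) none
              (some (ox + w - (if x < ox then ox else x))), c) ::
          cropToWindowGo oy ox h w y ((if x < ox then ox else x) +
            PySem.Str.len (if x < ox then PySem.Str.slice v (some (ox - x)) none else v)) rest
      else
        (t, (if x < ox then PySem.Str.slice v (some (ox - x)) none else v), c) ::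
          cropToWindowGo oy ox h w y ((if x < ox then ox else x) +
            PySem.Str.len (if x < ox then PySem.Str.slice v (some (ox - x)) none else v)) rest := rfl

theorem pvSplitLinesGo_nil (line : List (String × String × String)) :
    pvSplitLinesGo line [] = if line = [] then [] else [(line.reverse, none)] := rfl

theorem pvSplitLinesGo_cons (line : List (String × String × String)) (t v c : String)
    (rest : List (String × String × String)) :
    pvSplitLinesGo line ((t, v, c) :: rest) =
      if v = "\n" then (line.reverse, some (t, v, c)) :: pvSplitLinesGo [] rest
      else pvSplitLinesGo ((t, v, c) :: line) rest := rfl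

theorem pvCropLineGo_nil (ox w x : Int) : pvCropLineGo ox w x [] = [] := rfl

theorem pvCropLineGo_cons (ox w x : Int) (t v c : String)
    (rest : List (String × String × String)) :
    pvCropLineGo ox w x ((t, v, c) :: rest) =
      (if ox < x + PySem.Str.len v ∧ x < ox + w then
         [(t, PySem.Str.slice (PySem.Str.slice v (some (max 0 (ox - x))) none) none
                (some (ox + w - max x ox)), c)]
       else []) ++ pvCropLineGo ox w (x + PySem.Str.len v) rest := rfl

theorem pvMainGo_nil (oy ox h w y : Int) : pvMainGo oy ox h w y [] = [] := rfl

theorem pvMainGo_cons (oy ox h w y : Int) (line : List (String × String × String))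
    (nl : Option (String × String × String))
    (rest : List (List (String × String × String) × Option (String × String × String))) :
    pvMainGo oy ox h w y ((line, nl) :: rest) =
      if oy + h ≤ y then []
      else if y < oy then pvMainGo oy ox h w (y + 1) rest
      else
        pvCropLineGo ox w 0 line ++
          (match nl with | some tk => [tk] | none => []) ++
          pvMainGo oy ox h w (y + 1) rest := rfl

-- total width (in columns) of a line's tokens
def pvLineWidth (l : List (String × String × String)) : Int :=
  (l.map (fun p => PySem.Str.len p.2.1)).sum

theorem pvLineWidth_cons (t v c : String) (rest : List (String × String × String)) :
    pvLineWidth ((t, v, c) :: rest) = PySem.Str.len v + pvLineWidth rest := by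
  simp [pvLineWidth]

theorem pvLineWidth_append_singleton (l : List (String × String × String)) (t v c : String) :
    pvLineWidth (l ++ [(t, v, c)]) = pvLineWidth l + PySem.Str.len v := by
  simp [pvLineWidth]

-- a slice to a stop at or past the end of the string is the whole string
theorem pvSlice_to_full (s : String) (b : Int) (hb : PySem.Str.len s ≤ b) :
    PySem.Str.slice s none (some b) = s := by
  have hlen := PySem.Str.len_eq s
  apply String.toList_inj.mp
  rw [PySem.Str.toList_slice, PySem.Chars.slice_eq_listSlice,
    PySem.List.slice_to _ (by omega : (0 : Int) ≤ b)]
  apply List.take_of_length_le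
  omega

-- length of a left trim
theorem pvSlice_drop_len (v : String) (a : Int) (h0 : 0 ≤ a) :
    PySem.Str.len (PySem.Str.slice v (some a) none) = max 0 (PySem.Str.len v - a) := by
  have hlen := PySem.Str.len_eq v
  rw [PySem.Str.len_eq, PySem.Str.toList_slice, PySem.Chars.slice_eq_listSlice,
    PySem.List.slice_from _ h0, List.length_drop]
  omega

-- trimming zero characters is the identity
theorem pvSlice_zero (v : String) : PySem.Str.slice v (some (0 : Int)) none = v := by
  apply String.toList_inj.mp
  rw [PySem.Str.toList_slice, PySem.Chars.slice_eq_listSlice, PySem.List.slice_zero_start,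
    PySem.List.slice_none_none]

-- once y is at or below the bottom of the window, A emits nothing more
theorem cropToWindowGo_dead (oy ox h w : Int) :
    ∀ (toks : List (String × String × String)) (y x : Int), oy + h ≤ y →
      cropToWindowGo oy ox h w y x toks = [] := by
  intro toks
  induction toks with
  | nil => intro y x _; rfl
  | cons tok rest ih =>
    intro y x hy
    obtain ⟨t, v, c⟩ := tok
    rw [cropToWindowGo_cons]
    by_cases hnl : v = "\n"
    · rw [if_pos hnl, if_neg (show ¬(oy ≤ y ∧ y < oy + h) by omega), ih (y + 1) 0 (by omega)]
      rfl
    · rw [if_neg hnl]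
      by_cases hlt : y < oy
      · rw [if_pos hlt]
        exact ih y x hy
      · rw [if_neg hlt, if_pos hy]

-- same for B's main loop
theorem pvMainGo_dead (oy ox h w : Int) (lines : List (List (String × String × String) × Option (String × String × String))) (y : Int) (hy : oy + h ≤ y) :
    pvMainGo oy ox h w y lines = [] := by
  cases lines with
  | nil => rfl
  | cons p rest =>
    obtain ⟨line, nl⟩ := p
    rw [pvMainGo_cons, if_pos hy]

-- cropping a concatenated line = crop the parts, the second starting at the first's width
theorem pvCropLineGo_append (ox w : Int) :
    ∀ (l1 l2 : List (String × String × String)) (x : Int),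
      pvCropLineGo ox w x (l1 ++ l2) = pvCropLineGo ox w x l1 ++ pvCropLineGo ox w (x + pvLineWidth l1) l2 := by
  intro l1
  induction l1 with
  | nil => intro l2 x; simp [pvCropLineGo_nil, pvLineWidth]
  | cons tok rest ih =>
    intro l2 x
    obtain ⟨t, v, c⟩ := tok
    rw [List.cons_append, pvCropLineGo_cons, pvCropLineGo_cons, ih l2 (x + PySem.Str.len v),
      List.append_assoc, pvLineWidth_cons,
      show x + PySem.Str.len v + pvLineWidth rest = x + (PySem.Str.len v + pvLineWidth rest) by
        ring]

-- the main simulation: B's per-line loop over the split lines reproduces A's interleaved scan,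
-- given that A's x equals the width of the accumulated partial line whenever the line is visible
theorem pvMain_eq (oy ox h w : Int) :
    ∀ (toks line : List (String × String × String)) (y x : Int),
      (oy ≤ y → x = pvLineWidth line.reverse) →
      pvMainGo oy ox h w y (pvSplitLinesGo line toks)
        = (if oy ≤ y ∧ y < oy + h then pvCropLineGo ox w 0 line.reverse else [])
          ++ cropToWindowGo oy ox h w y x toks := by
  intro toks
  induction toks with
  | nil =>
    intro line y x _
    rw [pvSplitLinesGo_nil, cropToWindowGo_nil, List.append_nil]
    by_cases hline : line = []
    · subst hline
      rw [if_pos rfl, pvMainGo_nil, List.reverse_nil, pvCropLineGo_nil, ite_self]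
    · rw [if_neg hline, pvMainGo_cons]
      by_cases hdead : oy + h ≤ y
      · rw [if_pos hdead, if_neg (show ¬(oy ≤ y ∧ y < oy + h) by omega)]
      · rw [if_neg hdead]
        by_cases hlt : y < oy
        · rw [if_pos hlt, pvMainGo_nil, if_neg (show ¬(oy ≤ y ∧ y < oy + h) by omega)]
        · rw [if_neg hlt, pvMainGo_nil, if_pos (show oy ≤ y ∧ y < oy + h by omega)]
          simp
  | cons tok rest ih =>
    intro line y x hx
    obtain ⟨t, v, c⟩ := tok
    rw [pvSplitLinesGo_cons, cropToWindowGo_cons]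
    by_cases hnl : v = "\n"
    · rw [if_pos hnl, if_pos hnl, pvMainGo_cons]
      have ihz := ih [] (y + 1) 0 (fun _ => rfl)
      rw [List.reverse_nil, pvCropLineGo_nil, ite_self, List.nil_append] at ihz
      by_cases hdead : oy + h ≤ y
      · rw [if_pos hdead, if_neg (show ¬(oy ≤ y ∧ y < oy + h) by omega),
          if_neg (show ¬(oy ≤ y ∧ y < oy + h) by omega),
          cropToWindowGo_dead oy ox h w rest (y + 1) 0 (by omega)]
        rfl
      · rw [if_neg hdead]
        by_cases hlt : y < oy
        · rw [if_pos hlt, ihz, if_neg (show ¬(oy ≤ y ∧ y < oy + h) by omega),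
            if_neg (show ¬(oy ≤ y ∧ y < oy + h) by omega)]
          simp
        · rw [if_neg hlt, ihz, if_pos (show oy ≤ y ∧ y < oy + h by omega),
            if_pos (show oy ≤ y ∧ y < oy + h by omega)]
          simp
    · rw [if_neg hnl, if_neg hnl]
      by_cases hlt : y < oy
      · rw [if_pos hlt,
          ih ((t, v, c) :: line) y x (fun hy => absurd hy (by omega)),
          if_neg (show ¬(oy ≤ y ∧ y < oy + h) by omega),
          if_neg (show ¬(oy ≤ y ∧ y < oy + h) by omega)]
      · by_cases hdead : oy + h ≤ y
        · rw [if_neg hlt, if_pos hdead, pvMainGo_dead oy ox h w _ y hdead,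
            if_neg (show ¬(oy ≤ y ∧ y < oy + h) by omega)]
          rfl
        · have hxw : x = pvLineWidth line.reverse := hx (by omega)
          rw [if_neg hlt, if_neg hdead,
            ih ((t, v, c) :: line) y (x + PySem.Str.len v)
              (fun _ => by rw [List.reverse_cons, pvLineWidth_append_singleton]; omega),
            if_pos (show oy ≤ y ∧ y < oy + h by omega),
            if_pos (show oy ≤ y ∧ y < oy + h by omega),
            List.reverse_cons,
            pvCropLineGo_append ox w line.reverse [(t, v, c)] 0,
            show (0 : Int) + pvLineWidth line.reverse = x by omega,
            pvCropLineGo_cons, pvCropLineGo_nil, List.append_nil, List.append_assoc]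
          by_cases hskip : x + PySem.Str.len v ≤ ox ∨ ox + w ≤ x
          · rw [if_pos hskip, if_neg (show ¬(ox < x + PySem.Str.len v ∧ x < ox + w) by omega),
              List.nil_append]
          · rw [if_neg hskip, if_pos (show ox < x + PySem.Str.len v ∧ x < ox + w by omega)]
            have hlenv := PySem.Str.len_eq v
            by_cases hxo : x < ox
            · simp only [if_pos hxo]
              rw [show max 0 (ox - x) = ox - x by omega, show max x ox = ox by omega]
              have hlen1 : PySem.Str.len (PySem.Str.slice v (some (ox - x)) none)
                  = PySem.Str.len v - (ox - x) := by
                rw [pvSlice_drop_len v (ox - x) (by omega)]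
                omega
              rw [show ox + PySem.Str.len (PySem.Str.slice v (some (ox - x)) none)
                    = x + PySem.Str.len v by rw [hlen1]; ring]
              by_cases hcut : ox + w < x + PySem.Str.len v
              · rw [if_pos hcut, List.singleton_append]
              · rw [if_neg hcut,
                  pvSlice_to_full (PySem.Str.slice v (some (ox - x)) none) (ox + w - ox)
                    (by rw [hlen1]; omega),
                  List.singleton_append]
            · simp only [if_neg hxo]
              rw [show max 0 (ox - x) = 0 by omega, show max x ox = x by omega, pvSlice_zero]
              by_cases hcut : ox + w < x + PySem.Str.len v
              · rw [if_pos hcut, List.singleton_append]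
              · rw [if_neg hcut, pvSlice_to_full v (ox + w - x) (by omega),
                  List.singleton_append]

-- ===== VERDICT (by name: the statement is the Claim_ definition above) =====
theorem cropToWindow_spec : Claim_equal_cropToWindow := by
  intro tokens oy ox h w _
  unfold Spec_cropToWindow cropToWindow cropToWindow_alt
  rw [pvMain_eq oy ox h w tokens [] 0 0 (fun _ => rfl), List.reverse_nil, pvCropLineGo_nil,
    ite_self, List.nil_append]
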